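-- pv_equiv track=rewrite | github.com/ChaoticTiramisu/webhook-amp-clouflare | amp_cf_srv_sync.py | is_sftp_management_row
-- ===== SOURCE A (Python) =====
-- from typing import Any, Dict, List, Optional
--
-- def is_sftp_management_row(value: Any) -> bool:
--     if not isinstance(value, dict):
--         return False
--
--     for key in (
--         "display_name",
--         "DisplayName",
--         "description",
--         "Description",
--         "name",
--         "Name",
--         "title",
--         "Title",
--         "type",
--         "Type",
--     ):
--         text = value.get(key)
--         if isinstance(text, str) and "sftp" in text.lower():
--             return True
--
--     return False
-- ===== SOURCE B (Python) =====
-- from typing import Any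
--
-- _KNOWN_KEYS = {
--     "display_name", "DisplayName",
--     "description", "Description",
--     "name", "Name",
--     "title", "Title",
--     "type", "Type",
-- }
--
--
-- def is_sftp_management_row(value: Any) -> bool:
--     if not isinstance(value, dict):
--         return False
--     return any(
--         k in _KNOWN_KEYS and isinstance(v, str) and "sftp" in v.lower()
--         for k, v in value.items()
--     )
-- ===== Notes on version B (the rewrite author's own statement) =====
-- stated objective: idiomatic
-- what changed: Instead of probing each of the 10 fixed keys with value.get, B makes one pass over value.items() and tests each entry's key against a set of the known keys, returning on the first matching entry; Pre_ excludes only association lists with duplicate keys, which represent no Python dict.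
import Mathlib
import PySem

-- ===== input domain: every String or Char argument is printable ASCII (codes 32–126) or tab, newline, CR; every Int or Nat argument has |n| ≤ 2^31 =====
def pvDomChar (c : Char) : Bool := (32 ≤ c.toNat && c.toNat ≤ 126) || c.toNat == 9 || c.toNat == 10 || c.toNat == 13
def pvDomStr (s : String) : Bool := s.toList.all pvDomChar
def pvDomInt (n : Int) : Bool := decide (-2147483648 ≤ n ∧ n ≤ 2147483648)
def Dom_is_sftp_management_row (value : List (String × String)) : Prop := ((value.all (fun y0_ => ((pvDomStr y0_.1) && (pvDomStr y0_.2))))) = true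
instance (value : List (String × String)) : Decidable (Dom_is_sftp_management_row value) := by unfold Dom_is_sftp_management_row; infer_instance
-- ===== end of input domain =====

-- B replaces A's probe of 10 fixed keys by a single pass over the dict's items filtered
-- through a set of the known keys (idiomatic any(...) over items); return value only.

-- ===== PORT A =====
-- the tuple of candidate keys A iterates over
def pvCandidateKeys : List String :=
  ["display_name", "DisplayName", "description", "Description", "name", "Name",
   "title", "Title", "type", "Type"]

-- value.get(key) on the association list: first match, none if absent
def pvGet (value : List (String × String)) (key : String) : Option String :=
  match value with
  | [] => none
  | (k, v) :: rest => if k == key then some v else pvGet rest key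

-- the for-loop over the candidate keys, returning True on the first hit
def pvProbe (keys : List String) (value : List (String × String)) : Bool :=
  match keys with
  | [] => false
  | key :: rest =>
    match pvGet value key with
    | some text =>
      if PySem.Str.isIn "sftp" (PySem.Str.lower text) then true else pvProbe rest value
    | none => pvProbe rest value

def is_sftp_management_row (value : List (String × String)) : Bool :=
  pvProbe pvCandidateKeys value

-- ===== PORT B =====
def pvKnownKeys : PySem.Set String :=
  PySem.Set.ofList
    ["display_name", "DisplayName", "description", "Description", "name", "Name",
     "title", "Title", "type", "Type"]

def is_sftp_management_row_alt (value : List (String × String)) : Bool :=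
  value.any (fun kv =>
    PySem.Set.contains pvKnownKeys kv.1 && PySem.Str.isIn "sftp" (PySem.Str.lower kv.2))

-- ===== PRECONDITION & SPEC =====
-- Pre_ excludes association lists with a repeated key: those represent no Python dict
-- (a dict's keys are unique), and on them A's per-key first-match get and B's scan of
-- all entries may see different entries.
def Pre_is_sftp_management_row (value : List (String × String)) : Prop :=
  (value.map Prod.fst).Nodup
instance (value : List (String × String)) : Decidable (Pre_is_sftp_management_row value) := by
  unfold Pre_is_sftp_management_row; infer_instance

def pvWitness_is_sftp_management_row : (List (String × String)) :=
  [("name", "abc"), ("Name", "SFTP row"), ("foo", "bar")]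

def Spec_is_sftp_management_row (value : List (String × String)) (out : Bool) : Prop := out = is_sftp_management_row_alt value
instance (value : List (String × String)) (out : Bool) : Decidable (Spec_is_sftp_management_row value out) := by unfold Spec_is_sftp_management_row; infer_instance

-- ===== CLAIM (what is proved, stated in full; the proofs are below) =====
def Claim_equal_is_sftp_management_row : Prop := ∀ (value : List (String × String)), Dom_is_sftp_management_row value → Pre_is_sftp_management_row value → Spec_is_sftp_management_row value (is_sftp_management_row value)

-- ===== LEMMAS AND PROOFS =====
-- the text test both programs apply to a value
def pvHit (text : String) : Bool := PySem.Str.isIn "sftp" (PySem.Str.lower text)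

lemma pvProbe_eq_any (keys : List String) (value : List (String × String)) :
    pvProbe keys value =
      keys.any (fun key => (pvGet value key).rec false pvHit) := by
  induction keys with
  | nil => rfl
  | cons key rest ih =>
    simp only [pvProbe, List.any_cons, ← ih]
    cases pvGet value key with
    | none => simp
    | some text => cases PySem.Str.isIn "sftp" (PySem.Str.lower text) <;> simp [pvHit]

lemma pvGet_eq_some_of_mem {value : List (String × String)} {k v : String}
    (hnd : (value.map Prod.fst).Nodup) (hm : (k, v) ∈ value) :
    pvGet value k = some v := by
  induction value with
  | nil => simp at hm
  | cons p rest ih =>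
    obtain ⟨k', v'⟩ := p
    simp only [List.map_cons, List.nodup_cons] at hnd
    rcases List.mem_cons.mp hm with h | h
    · obtain ⟨rfl, rfl⟩ := Prod.mk.injEq .. ▸ h
      simp [pvGet]
    · have hne : k' ≠ k := by
        rintro rfl
        exact hnd.1 (List.mem_map.mpr ⟨(k', v), h, rfl⟩)
      simpa [pvGet, hne] using ih hnd.2 h

lemma pvMem_of_pvGet_eq_some {value : List (String × String)} {k v : String}
    (h : pvGet value k = some v) : (k, v) ∈ value := by
  induction value with
  | nil => simp [pvGet] at h
  | cons p rest ih =>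
    obtain ⟨k', v'⟩ := p
    simp only [pvGet] at h
    by_cases hk : k' == k
    · simp only [hk, if_pos] at h
      obtain rfl : k' = k := by simpa using hk
      obtain rfl : v' = v := by simpa using h
      exact List.mem_cons_self ..
    · simp only [hk] at h
      exact List.mem_cons_of_mem _ (ih h)

-- ===== VERDICT (by name: the statement is the Claim_ definition above) =====
theorem is_sftp_management_row_spec : Claim_equal_is_sftp_management_row := by
  intro value _ hpre
  unfold Spec_is_sftp_management_row is_sftp_management_row is_sftp_management_row_alt
  rw [pvProbe_eq_any]
  apply Bool.coe_iff_coe.mp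
  simp only [List.any_eq_true]
  constructor
  · rintro ⟨key, hkey, hh⟩
    cases hg : pvGet value key with
    | none => rw [hg] at hh; simp at hh
    | some text =>
      rw [hg] at hh
      refine ⟨(key, text), pvMem_of_pvGet_eq_some hg, ?_⟩
      simpa [pvKnownKeys, pvCandidateKeys, PySem.Set.contains, pvHit] using
        And.intro hkey hh
  · rintro ⟨⟨k, v⟩, hm, hh⟩
    simp only [Bool.and_eq_true] at hh
    refine ⟨k, ?_, ?_⟩
    · have := hh.1
      simpa [pvKnownKeys, pvCandidateKeys, PySem.Set.contains] using this
    · rw [pvGet_eq_some_of_mem hpre hm]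
      simpa [pvHit] using hh.2
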